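-- pv_equiv track=rewrite | github.com/EnricoDuca/Lab | diapason.py | trova_picchi_potenza
-- ===== SOURCE A (Python) =====
-- def trova_picchi_potenza(frequenze, potenze, intervallo_frequenza):
--     picchi = []
--
--     for i in range(len(potenze)):
--         frequenza = frequenze[i]
--         potenza = potenze[i]
--
--         # intervallo di frequenza intorno al punto corrente
--         indice_inizio = max(0, i - intervallo_frequenza)
--         indice_fine = min(len(potenze), i + intervallo_frequenza + 1)
--
--         # Trova il massimo locale all'interno dell'intervallo
--         if potenza == max(potenze[indice_inizio:indice_fine]):
--             picchi.append((frequenza, potenza))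
--
--     return picchi
-- ===== SOURCE B (Python) =====
-- from collections import deque
--
-- def trova_picchi_potenza(frequenze, potenze, intervallo_frequenza):
--     # Sliding-window maximum with a monotonic deque: O(n) instead of O(n*k).
--     n = len(potenze)
--     k = intervallo_frequenza
--     picchi = []
--     dq = deque()  # indices with non-increasing potenze values
--     for j in range(n):
--         while dq and potenze[dq[-1]] < potenze[j]:
--             dq.pop()
--         dq.append(j)
--         i = j - k
--         if i >= 0:
--             while dq and dq[0] < i - k:
--                 dq.popleft()
--             if potenze[i] == potenze[dq[0]]:
--                 picchi.append((frequenze[i], potenze[i]))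
--     for i in range(max(0, n - k), n):
--         while dq and dq[0] < i - k:
--             dq.popleft()
--         if potenze[i] == potenze[dq[0]]:
--             picchi.append((frequenze[i], potenze[i]))
--     return picchi
-- ===== Notes on version B (the rewrite author's own statement) =====
-- stated objective: faster
-- what changed: Replaces the per-index window rescan (slice + max for every i) by a single left-to-right pass that maintains a monotonic deque of candidate indices, so each element is pushed and popped at most once.
import Mathlib
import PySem

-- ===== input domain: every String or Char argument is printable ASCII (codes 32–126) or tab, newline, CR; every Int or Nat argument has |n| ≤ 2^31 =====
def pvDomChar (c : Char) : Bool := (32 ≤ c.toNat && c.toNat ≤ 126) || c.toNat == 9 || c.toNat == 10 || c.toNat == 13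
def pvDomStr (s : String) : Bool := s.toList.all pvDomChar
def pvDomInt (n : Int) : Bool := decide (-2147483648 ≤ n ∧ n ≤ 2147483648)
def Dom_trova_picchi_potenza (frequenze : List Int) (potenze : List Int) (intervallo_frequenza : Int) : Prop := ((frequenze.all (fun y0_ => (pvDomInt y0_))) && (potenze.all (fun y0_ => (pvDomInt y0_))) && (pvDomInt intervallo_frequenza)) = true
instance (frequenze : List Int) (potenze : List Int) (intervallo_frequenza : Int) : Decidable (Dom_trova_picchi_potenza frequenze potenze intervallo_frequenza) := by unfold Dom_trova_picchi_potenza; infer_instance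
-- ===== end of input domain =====

-- B replaces A's per-index slice+max window rescan (O(n*k)) by one monotonic-deque
-- sliding-window-maximum pass (O(n)); return values proved equal on Pre_.

-- ===== PORT A =====
def trova_picchi_potenza (frequenze : List Int) (potenze : List Int) (intervallo_frequenza : Int) : List (Int × Int) :=
  (List.range potenze.length).foldl (fun picchi (i : Nat) =>
    let frequenza := PySem.List.pyGetD frequenze (i : Int) 0
    let potenza := PySem.List.pyGetD potenze (i : Int) 0
    let indice_inizio : Int := max 0 ((i : Int) - intervallo_frequenza)
    let indice_fine : Int := min ((potenze.length : Int)) ((i : Int) + intervallo_frequenza + 1)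
    if potenza = (PySem.List.max? (PySem.List.slice potenze (some indice_inizio) (some indice_fine)) (fun y => y)).getD 0
    then picchi ++ [(frequenza, potenza)] else picchi) []

-- ===== PORT B =====
-- 'while dq and potenze[dq[-1]] < v: dq.pop()' (pop from the back of the deque)
def pvPopBack (potenze : List Int) (v : Int) : List Nat → List Nat
  | [] => []
  | m :: rest =>
    match pvPopBack potenze v rest with
    | [] => if PySem.List.pyGetD potenze (m : Int) 0 < v then [] else [m]
    | r => m :: r

-- body of B's first loop (index j; emits the peak test for i = j - k)
def pvStep1 (frequenze potenze : List Int) (k : Int) (st : List Nat × List (Int × Int)) (j : Nat) : List Nat × List (Int × Int) :=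
  let dq1 := pvPopBack potenze (PySem.List.pyGetD potenze (j : Int) 0) st.1 ++ [j]
  let i : Int := (j : Int) - k
  if 0 ≤ i then
    let dq2 := dq1.dropWhile (fun m : Nat => decide ((m : Int) < i - k))
    if PySem.List.pyGetD potenze i 0 = PySem.List.pyGetD potenze ((dq2.headD 0 : Nat) : Int) 0 then
      (dq2, st.2 ++ [(PySem.List.pyGetD frequenze i 0, PySem.List.pyGetD potenze i 0)])
    else (dq2, st.2)
  else (dq1, st.2)

-- body of B's second loop (the tail indices i = max(0, n-k) .. n-1)
def pvStep2 (frequenze potenze : List Int) (k : Int) (st : List Nat × List (Int × Int)) (i : Int) : List Nat × List (Int × Int) :=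
  let dq2 := st.1.dropWhile (fun m : Nat => decide ((m : Int) < i - k))
  if PySem.List.pyGetD potenze i 0 = PySem.List.pyGetD potenze ((dq2.headD 0 : Nat) : Int) 0 then
    (dq2, st.2 ++ [(PySem.List.pyGetD frequenze i 0, PySem.List.pyGetD potenze i 0)])
  else (dq2, st.2)

def trova_picchi_potenza_alt (frequenze : List Int) (potenze : List Int) (intervallo_frequenza : Int) : List (Int × Int) :=
  let n := potenze.length
  let k := intervallo_frequenza
  let st := (List.range n).foldl (pvStep1 frequenze potenze k) ([], [])
  ((PySem.List.pyRange (max 0 ((n : Int) - k)) (n : Int) 1).foldl (pvStep2 frequenze potenze k) st).2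

-- ===== PRECONDITION & SPEC =====
-- Pre_ excludes exactly the inputs where Python A raises: frequenze shorter than potenze
-- (IndexError at frequenze[i]) and a negative window with nonempty potenze (max([]) ValueError).
def Pre_trova_picchi_potenza (frequenze : List Int) (potenze : List Int) (intervallo_frequenza : Int) : Prop :=
  potenze = [] ∨ (potenze.length ≤ frequenze.length ∧ 0 ≤ intervallo_frequenza)
instance (frequenze : List Int) (potenze : List Int) (intervallo_frequenza : Int) : Decidable (Pre_trova_picchi_potenza frequenze potenze intervallo_frequenza) := by unfold Pre_trova_picchi_potenza; infer_instance

def pvWitness_trova_picchi_potenza : List Int × List Int × Int := ([10, 20, 30], [1, 5, 2], 1)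

def Spec_trova_picchi_potenza (frequenze : List Int) (potenze : List Int) (intervallo_frequenza : Int) (out : List (Int × Int)) : Prop := out = trova_picchi_potenza_alt frequenze potenze intervallo_frequenza
instance (frequenze : List Int) (potenze : List Int) (intervallo_frequenza : Int) (out : List (Int × Int)) : Decidable (Spec_trova_picchi_potenza frequenze potenze intervallo_frequenza out) := by unfold Spec_trova_picchi_potenza; infer_instance

-- ===== CLAIM (what is proved, stated in full; the proofs are below) =====
def Claim_equal_trova_picchi_potenza : Prop := ∀ (frequenze : List Int) (potenze : List Int) (intervallo_frequenza : Int), Dom_trova_picchi_potenza frequenze potenze intervallo_frequenza → Pre_trova_picchi_potenza frequenze potenze intervallo_frequenza → Spec_trova_picchi_potenza frequenze potenze intervallo_frequenza (trova_picchi_potenza frequenze potenze intervallo_frequenza)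

-- ===== LEMMAS AND PROOFS =====

-- A's peak test at index i, as a Bool (exactly the expression A's loop evaluates)
def pvCondA (potenze : List Int) (k : Int) (i : Nat) : Bool :=
  decide (potenze.getD i 0 = (PySem.List.max? (PySem.List.slice potenze (some (max 0 ((i : Int) - k))) (some (min ((potenze.length : Int)) ((i : Int) + k + 1)))) (fun y => y)).getD 0)

-- A's output after the first m loop iterations
def pvOut (frequenze potenze : List Int) (k : Int) (m : Nat) : List (Int × Int) :=
  ((List.range m).filter (fun i => pvCondA potenze k i)).map (fun i => (frequenze.getD i 0, potenze.getD i 0))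

-- m is a weak suffix maximum of indices [m+1, j)
def pvSuf (potenze : List Int) (j m : Nat) : Bool :=
  (List.range' (m + 1) (j - (m + 1))).all (fun m' => decide (potenze.getD m' 0 ≤ potenze.getD m 0))

-- closed form of the deque after processing indices [0, j) with front bound lo
def pvCand (potenze : List Int) (lo : Int) (j : Nat) : List Nat :=
  (List.range j).filter (fun m => decide (lo ≤ (m : Int)) && pvSuf potenze j m)

lemma pvMem_cand (pot : List Int) (lo : Int) (j m : Nat) :
    m ∈ pvCand pot lo j ↔ m < j ∧ lo ≤ (m : Int) ∧ ∀ m', m < m' → m' < j → pot.getD m' 0 ≤ pot.getD m 0 := by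
  simp only [pvCand, pvSuf, List.mem_filter, List.mem_range, Bool.and_eq_true, decide_eq_true_eq,
    List.all_eq_true, List.mem_range'_1]
  constructor
  · rintro ⟨h1, h2, h3⟩
    exact ⟨h1, h2, fun m' hm1 hm2 => h3 m' ⟨by omega, by omega⟩⟩
  · rintro ⟨h1, h2, h3⟩
    exact ⟨h1, h2, fun m' hm' => h3 m' (by omega) (by omega)⟩


lemma pvCand_sorted (pot : List Int) (lo : Int) (j : Nat) : (pvCand pot lo j).Pairwise (· < ·) := by
  exact List.Pairwise.filter _ (List.pairwise_lt_range)


lemma pvPopBack_eq_filter (pot : List Int) (v : Int) (l : List Nat)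
    (hs : l.Pairwise (· < ·))
    (ha : ∀ a ∈ l, ∀ b ∈ l, a < b → pot.getD b 0 ≤ pot.getD a 0) :
    pvPopBack pot v l = l.filter (fun m => decide (v ≤ pot.getD m 0)) := by
  induction l with
  | nil => rfl
  | cons m rest ih =>
    have hmlt : ∀ b ∈ rest, m < b := fun b hb => List.rel_of_pairwise_cons hs hb
    have hrest := ih hs.of_cons
      (fun a haa b hb h => ha a (List.mem_cons_of_mem _ haa) b (List.mem_cons_of_mem _ hb) h)
    rw [List.filter_cons]
    simp only [pvPopBack]
    cases hr : pvPopBack pot v rest with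
    | nil =>
      have hfil : rest.filter (fun m => decide (v ≤ pot.getD m 0)) = [] := by rw [← hrest, hr]
      rw [hfil]
      simp only [PySem.List.pyGetD_natCast, List.getD_eq_getElem?_getD]
      by_cases hv : pot[m]?.getD 0 < v
      · rw [if_pos hv, if_neg (by simp; omega)]
      · rw [if_neg hv, if_pos (by simp; omega)]
    | cons x xs =>
      have hfil : rest.filter (fun m => decide (v ≤ pot.getD m 0)) = x :: xs := by rw [← hrest, hr]
      have hx : x ∈ rest.filter (fun m => decide (v ≤ pot.getD m 0)) := by
        rw [hfil]; exact List.mem_cons_self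
      rw [List.mem_filter] at hx
      have hvm : v ≤ pot.getD m 0 := by
        have h1 : pot.getD x 0 ≤ pot.getD m 0 :=
          ha m List.mem_cons_self x (List.mem_cons_of_mem _ hx.1) (hmlt x hx.1)
        have h2 : v ≤ pot.getD x 0 := by simpa using hx.2
        omega
      simp only [hvm, decide_true, if_pos]
      rw [hfil]


lemma pvCand_congr_nonpos (pot : List Int) (lo lo' : Int) (j : Nat) (h : lo ≤ 0) (h' : lo' ≤ 0) :
    pvCand pot lo j = pvCand pot lo' j := by
  unfold pvCand
  apply List.filter_congr
  intro m _
  have h1 : lo ≤ (m : Int) := by omega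
  have h2 : lo' ≤ (m : Int) := by omega
  simp [h1, h2]


lemma pvCand_succ (pot : List Int) (lo : Int) (j : Nat) (h : lo ≤ (j : Int)) :
    pvCand pot lo (j + 1) = pvPopBack pot (pot.getD j 0) (pvCand pot lo j) ++ [j] := by
  have hanti : ∀ a ∈ pvCand pot lo j, ∀ b ∈ pvCand pot lo j, a < b → pot.getD b 0 ≤ pot.getD a 0 := by
    intro a haa b hb hab
    exact ((pvMem_cand pot lo j a).mp haa).2.2 b hab ((pvMem_cand pot lo j b).mp hb).1
  rw [pvPopBack_eq_filter pot _ _ (pvCand_sorted pot lo j) hanti]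
  unfold pvCand
  rw [List.range_succ, List.filter_append, List.filter_filter]
  congr 1
  · apply List.filter_congr
    intro m hm
    rw [List.mem_range] at hm
    have h1 : j + 1 - (m + 1) = (j - (m + 1)) + 1 := by omega
    have h2 : m + 1 + (j - (m + 1)) = j := by omega
    have hsuf : pvSuf pot (j + 1) m = (pvSuf pot j m && decide (pot.getD j 0 ≤ pot.getD m 0)) := by
      rw [pvSuf, h1, List.range'_concat]
      have h2' : m + 1 + 1 * (j - (m + 1)) = j := by omega
      rw [h2', List.all_append]
      simp [pvSuf]
    rw [hsuf, ← Bool.and_assoc]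
    cases decide (lo ≤ (m : Int)) <;> cases pvSuf pot j m <;>
      cases decide (pot.getD j 0 ≤ pot.getD m 0) <;> rfl
  · have hsj : pvSuf pot (j + 1) j = true := by simp [pvSuf]
    simp [hsj, h]


lemma pvDropWhile_eq_filter (c : Int) (l : List Nat) (hs : l.Pairwise (· < ·)) :
    l.dropWhile (fun m : Nat => decide ((m : Int) < c)) = l.filter (fun m : Nat => decide (c ≤ (m : Int))) := by
  induction l with
  | nil => rfl
  | cons m rest ih =>
    by_cases hm : (m : Int) < c
    · rw [List.dropWhile_cons_of_pos (by simpa using hm), List.filter_cons_of_neg (by simp; omega)]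
      exact ih hs.of_cons
    · rw [List.dropWhile_cons_of_neg (by simpa using hm), List.filter_cons_of_pos (by simp; omega)]
      rw [List.filter_eq_self.mpr]
      intro b hb
      have := List.rel_of_pairwise_cons hs hb
      simp; omega


lemma pvCand_drop (pot : List Int) (lo lo' : Int) (j : Nat) (h : lo ≤ lo') :
    (pvCand pot lo j).dropWhile (fun m : Nat => decide ((m : Int) < lo')) = pvCand pot lo' j := by
  rw [pvDropWhile_eq_filter _ _ (pvCand_sorted pot lo j)]
  unfold pvCand
  rw [List.filter_filter]
  apply List.filter_congr
  intro m _
  by_cases h2 : lo' ≤ (m : Int)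
  · have h1 : lo ≤ (m : Int) := le_trans h h2
    simp [h1, h2]
  · simp [h2]


lemma pvHead (pot : List Int) (lo : Int) (j w : Nat) (hw : w < j) (hlo : lo ≤ (w : Int)) :
    (pvCand pot lo j).headD 0 ∈ pvCand pot lo j ∧
      ∀ m, m < j → lo ≤ (m : Int) → pot.getD m 0 ≤ pot.getD ((pvCand pot lo j).headD 0) 0 := by
  have hj1 : j - 1 ∈ pvCand pot lo j := by
    rw [pvMem_cand]
    exact ⟨by omega, by omega, fun m' hm1 hm2 => by omega⟩
  obtain ⟨h, t, hht⟩ := List.exists_cons_of_ne_nil (List.ne_nil_of_mem hj1)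
  have hhd : (pvCand pot lo j).headD 0 = h := by rw [hht]; rfl
  have hhmem : h ∈ pvCand pot lo j := by rw [hht]; exact List.mem_cons_self
  have hmin : ∀ m ∈ pvCand pot lo j, h ≤ m := by
    intro m hm
    rw [hht] at hm
    rcases List.mem_cons.mp hm with rfl | hm
    · exact le_refl _
    · exact le_of_lt (List.rel_of_pairwise_cons (hht ▸ pvCand_sorted pot lo j) hm)
  have key : ∀ d m, m < j → lo ≤ (m : Int) → j - m ≤ d → pot.getD m 0 ≤ pot.getD h 0 := by
    intro d
    induction d with
    | zero => intro m h1 _ h3; omega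
    | succ d ih =>
      intro m h1 h2 h3
      by_cases hmem : m ∈ pvCand pot lo j
      · rcases eq_or_lt_of_le (hmin m hmem) with heq | hlt
        · rw [← heq]
        · exact ((pvMem_cand pot lo j h).mp hhmem).2.2 m hlt h1
      · rw [pvMem_cand] at hmem
        push Not at hmem
        obtain ⟨m', hm1, hm2, hm3⟩ := hmem h1 h2
        have hlt : pot.getD m 0 < pot.getD m' 0 := by omega
        have := ih m' hm2 (by omega) (by omega)
        omega
  exact ⟨hhd ▸ hhmem, fun m hm hl => hhd ▸ key j m hm hl (by omega)⟩


lemma pvCond_eq (pot : List Int) (k : Int) (hk : 0 ≤ k) (i j : Nat) (hij : i < j)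
    (hj : (j : Int) = min ((pot.length : Int)) ((i : Int) + k + 1)) :
    (pot.getD i 0 = pot.getD ((pvCand pot ((i : Int) - k) j).headD 0) 0) ↔ pvCondA pot k i = true := by
  have hjn : j ≤ pot.length := by omega
  have h0a : (0 : Int) ≤ max 0 ((i : Int) - k) := le_max_left _ _
  have h0b : (0 : Int) ≤ min ((pot.length : Int)) ((i : Int) + k + 1) := by
    rcases min_cases ((pot.length : Int)) ((i : Int) + k + 1) with ⟨heq, _⟩ | ⟨heq, _⟩ <;> omega
  set a : Nat := (max 0 ((i : Int) - k)).toNat with ha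
  have haj : (a : Int) = max 0 ((i : Int) - k) := Int.toNat_of_nonneg h0a
  have hai : a ≤ i := by
    rcases max_cases (0 : Int) ((i : Int) - k) with ⟨heq, _⟩ | ⟨heq, _⟩ <;> omega
  have hbj : (min ((pot.length : Int)) ((i : Int) + k + 1)).toNat = j := by
    rw [← hj]; exact Int.toNat_natCast j
  have hsl : PySem.List.slice pot (some (max 0 ((i : Int) - k))) (some (min ((pot.length : Int)) ((i : Int) + k + 1))) = (pot.drop a).take (j - a) := by
    rw [PySem.List.slice_toNat _ h0a h0b, hbj]
  set L := (pot.drop a).take (j - a) with hL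
  have hlen : L.length = j - a := by
    simp [hL]
    omega
  have hmemL : ∀ y, y ∈ L ↔ ∃ m, a ≤ m ∧ m < j ∧ y = pot.getD m 0 := by
    intro y
    constructor
    · intro hy
      obtain ⟨t, ht, rfl⟩ := List.mem_iff_getElem.mp hy
      have ht' : t < L.length := ht
      rw [hlen] at ht'
      have htl : a + t < pot.length := by omega
      refine ⟨a + t, by omega, by omega, ?_⟩
      rw [List.getD_eq_getElem pot 0 htl]
      simp [hL, List.getElem_take, List.getElem_drop]
    · rintro ⟨m, h1, h2, rfl⟩
      have htl : m < pot.length := by omega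
      rw [List.mem_iff_getElem]
      refine ⟨m - a, by omega, ?_⟩
      have hma : a + (m - a) = m := by omega
      rw [List.getD_eq_getElem pot 0 htl]
      simp [hL, List.getElem_take, List.getElem_drop, hma]
  have hiL : pot.getD i 0 ∈ L := (hmemL _).mpr ⟨i, hai, hij, rfl⟩
  obtain ⟨hhmem, hhmax⟩ := pvHead pot ((i : Int) - k) j i hij (by omega)
  set hd := (pvCand pot ((i : Int) - k) j).headD 0 with hhd
  obtain ⟨hdj, hdlo, _⟩ := (pvMem_cand pot _ j hd).mp hhmem
  cases hmax : PySem.List.max? L (fun y => y) with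
  | none =>
    rw [PySem.List.max?_eq_none_iff] at hmax
    rw [hmax] at hiL
    simp at hiL
  | some v =>
    have hvmem := PySem.List.max?_mem hmax
    have hvmax := PySem.List.max?_isMax hmax
    have hv1 : pot.getD hd 0 ≤ v := by
      have : pot.getD hd 0 ∈ L := (hmemL _).mpr ⟨hd, by omega, hdj, rfl⟩
      simpa using hvmax _ this
    have hv2 : v ≤ pot.getD hd 0 := by
      obtain ⟨m, h1, h2, rfl⟩ := (hmemL v).mp hvmem
      exact hhmax m h2 (by omega)
    have hv : v = pot.getD hd 0 := le_antisymm hv2 hv1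
    rw [pvCondA, decide_eq_true_eq, hsl, hmax]
    simp [hv]


lemma pvOut_succ (fr pot : List Int) (k : Int) (m : Nat) :
    pvOut fr pot k (m + 1) = pvOut fr pot k m ++ (if pvCondA pot k m then [(fr.getD m 0, pot.getD m 0)] else []) := by
  simp only [pvOut, List.range_succ, List.filter_append, List.map_append]
  congr 1
  by_cases hc : pvCondA pot k m <;> simp [hc]


lemma pvINV1 (fr pot : List Int) (k' : Nat) :
    ∀ j, j ≤ pot.length → (List.range j).foldl (pvStep1 fr pot (k' : Int)) ([], []) =
      (pvCand pot ((j : Int) - 1 - 2 * (k' : Int)) j, pvOut fr pot (k' : Int) (j - k')) := by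
  intro j
  induction j with
  | zero => intro _; simp [pvCand, pvOut]
  | succ j ih =>
    intro hj1
    rw [List.range_succ, List.foldl_append, ih (by omega), List.foldl_cons, List.foldl_nil]
    simp only [pvStep1, PySem.List.pyGetD_natCast]
    rw [← pvCand_succ pot ((j : Int) - 1 - 2 * (k' : Int)) j (by omega)]
    by_cases hki : (0 : Int) ≤ (j : Int) - (k' : Int)
    · rw [if_pos hki]
      rw [pvCand_drop pot _ ((j : Int) - (k' : Int) - (k' : Int)) (j + 1) (by omega)]
      have hi : (j : Int) - (k' : Int) = ((j - k' : Nat) : Int) := by omega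
      rw [hi]
      simp only [PySem.List.pyGetD_natCast]
      have hlo2 : ((j - k' : Nat) : Int) - (k' : Int) = ((j + 1 : Nat) : Int) - 1 - 2 * (k' : Int) := by
        push_cast; omega
      have hcnd := pvCond_eq pot (k' : Int) (by omega) (j - k') (j + 1) (by omega)
        (by rw [min_eq_right (by omega)]; omega)
      have hout : j + 1 - k' = (j - k') + 1 := by omega
      rw [hout, pvOut_succ]
      by_cases hc : pvCondA pot (k' : Int) (j - k') = true
      · rw [if_pos (hcnd.mpr hc), hlo2]
        simp [hc]
      · rw [if_neg (fun hh => hc (hcnd.mp hh)), hlo2]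
        simp [hc]
    · rw [if_neg hki]
      have h1 : pvCand pot ((j : Int) - 1 - 2 * (k' : Int)) (j + 1) = pvCand pot (((j + 1 : Nat) : Int) - 1 - 2 * (k' : Int)) (j + 1) := by
        apply pvCand_congr_nonpos <;> push_cast <;> omega
      have h2 : j + 1 - k' = j - k' := by omega
      rw [h1, h2]


lemma pvINV2 (fr pot : List Int) (k' : Nat) :
    ∀ t, t ≤ pot.length - (pot.length - k') →
      ((List.range t).map (fun s => (((pot.length - k') + s : Nat) : Int))).foldl (pvStep2 fr pot (k' : Int))
        (pvCand pot ((pot.length : Int) - 1 - 2 * (k' : Int)) pot.length, pvOut fr pot (k' : Int) (pot.length - k')) =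
      (pvCand pot ((((pot.length - k') + t : Nat) : Int) - 1 - (k' : Int)) pot.length, pvOut fr pot (k' : Int) ((pot.length - k') + t)) := by
  intro t
  induction t with
  | zero =>
    intro _
    have hbase : pvCand pot ((((pot.length - k') + 0 : Nat) : Int) - 1 - (k' : Int)) pot.length = pvCand pot ((pot.length : Int) - 1 - 2 * (k' : Int)) pot.length := by
      by_cases hkn : k' ≤ pot.length
      · congr 1; push_cast; omega
      · apply pvCand_congr_nonpos <;> push_cast <;> omega
    simp only [List.range_zero, List.map_nil, List.foldl_nil, hbase]
    simp
  | succ t ih =>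
    intro ht
    rw [List.range_succ, List.map_append, List.foldl_append, ih (by omega), List.map_cons,
      List.map_nil, List.foldl_cons, List.foldl_nil]
    simp only [pvStep2, PySem.List.pyGetD_natCast]
    rw [pvCand_drop pot _ ((((pot.length - k') + t : Nat) : Int) - (k' : Int)) pot.length (by push_cast; omega)]
    have hcnd := pvCond_eq pot (k' : Int) (by omega) ((pot.length - k') + t) pot.length (by omega)
      (by rw [min_eq_left (by push_cast; omega)])
    have hout : (pot.length - k') + (t + 1) = ((pot.length - k') + t) + 1 := by omega
    rw [hout, pvOut_succ]
    have hloeq : pvCand pot ((((pot.length - k') + t : Nat) : Int) - (k' : Int)) pot.length = pvCand pot (((((pot.length - k') + t) + 1 : Nat) : Int) - 1 - (k' : Int)) pot.length := by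
      congr 1; push_cast; omega
    rw [hloeq] at hcnd ⊢
    by_cases hc : pvCondA pot (k' : Int) ((pot.length - k') + t) = true
    · rw [if_pos (hcnd.mpr hc)]
      simp [hc]
    · rw [if_neg (fun hh => hc (hcnd.mp hh))]
      simp [hc]


lemma pvA_eq_out (fr pot : List Int) (k : Int) :
    trova_picchi_potenza fr pot k = pvOut fr pot k pot.length := by
  unfold trova_picchi_potenza
  show (List.range pot.length).foldl (fun picchi (i : Nat) =>
      if PySem.List.pyGetD pot (i : Int) 0 = (PySem.List.max? (PySem.List.slice pot (some (max 0 ((i : Int) - k))) (some (min ((pot.length : Int)) ((i : Int) + k + 1)))) (fun y => y)).getD 0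
      then picchi ++ [(PySem.List.pyGetD fr (i : Int) 0, PySem.List.pyGetD pot (i : Int) 0)] else picchi) [] = _
  rw [PySem.List.foldl_append_ite
    (fun i : Nat => PySem.List.pyGetD pot (i : Int) 0 = (PySem.List.max? (PySem.List.slice pot (some (max 0 ((i : Int) - k))) (some (min ((pot.length : Int)) ((i : Int) + k + 1)))) (fun y => y)).getD 0)
    (fun i : Nat => (PySem.List.pyGetD fr (i : Int) 0, PySem.List.pyGetD pot (i : Int) 0))]
  rw [List.nil_append]
  unfold pvOut
  have hfil : ∀ i : Nat, (decide (PySem.List.pyGetD pot (i : Int) 0 = (PySem.List.max? (PySem.List.slice pot (some (max 0 ((i : Int) - k))) (some (min ((pot.length : Int)) ((i : Int) + k + 1)))) (fun y => y)).getD 0)) = pvCondA pot k i := by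
    intro i
    simp [pvCondA]
  rw [List.filter_congr (fun i _ => hfil i)]
  apply List.map_congr_left
  intro i _
  simp


-- ===== VERDICT (by name: the statement is the Claim_ definition above) =====
theorem trova_picchi_potenza_spec : Claim_equal_trova_picchi_potenza := by
  intro fr pot k _ hpre
  unfold Spec_trova_picchi_potenza
  rcases hpre with rfl | ⟨_, hk⟩
  · simp [trova_picchi_potenza, trova_picchi_potenza_alt]
  · obtain ⟨k', rfl⟩ : ∃ k' : Nat, k = (k' : Int) := ⟨k.toNat, (Int.toNat_of_nonneg hk).symm⟩
    rw [pvA_eq_out]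
    show pvOut fr pot ((k' : Nat) : Int) pot.length =
      ((PySem.List.pyRange (max 0 ((pot.length : Int) - ((k' : Nat) : Int))) (pot.length : Int) 1).foldl
        (pvStep2 fr pot ((k' : Nat) : Int))
        ((List.range pot.length).foldl (pvStep1 fr pot ((k' : Nat) : Int)) ([], []))).2
    rw [pvINV1 fr pot k' pot.length le_rfl]
    have hax : max 0 ((pot.length : Int) - (k' : Nat)) = ((pot.length - k' : Nat) : Int) := by
      rcases max_cases (0 : Int) ((pot.length : Int) - (k' : Nat)) with ⟨heq, h2⟩ | ⟨heq, h2⟩ <;>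
        rw [heq] <;> omega
    rw [hax, PySem.List.pyRange_one]
    have hbt : ((pot.length : Int) - ((pot.length - k' : Nat) : Int)).toNat = pot.length - (pot.length - k') := by
      omega
    rw [hbt]
    have hmap : (List.range (pot.length - (pot.length - k'))).map (fun s : Nat => ((pot.length - k' : Nat) : Int) + (s : Nat)) = (List.range (pot.length - (pot.length - k'))).map (fun s : Nat => (((pot.length - k') + s : Nat) : Int)) := by
      apply List.map_congr_left
      intro s _
      omega
    rw [hmap, pvINV2 fr pot k' (pot.length - (pot.length - k')) le_rfl]
    have hfin : (pot.length - k') + (pot.length - (pot.length - k')) = pot.length := by omega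
    rw [hfin]
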